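-- pv_equiv track=rewrite | github.com/Alucarrd/nuffsaid_challenge | school_search.py | get_school_term_score
-- ===== SOURCE A (Python) =====
-- def get_school_term_score(score_dictionary, input_lists, point_weight):
--     """Go through the documents found from the terms and add the score
--
--         args:
--             score_dictionary (dictionary of int to int): score of each school (document)
--             input_lists (list of list of int): list of schools found for each term
--             point_weight (int): The points we add for each document found
--
--         return:
--             score_dictionary (dictionary of int to int):score board for each school identified
--
--     """
--     #Flatten the list of list for faster point calculation
--     input_list = [item for sublist in input_lists for item in sublist]
--
--     #Summing the points
--     for item in input_list:
--         if item in score_dictionary.keys():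
--             score_dictionary[item] = score_dictionary[item] + point_weight
--         else:
--
--             score_dictionary[item] = point_weight
--     return score_dictionary
-- ===== SOURCE B (Python) =====
-- def get_school_term_score(score_dictionary, input_lists, point_weight):
--     # Tally occurrences per school, then build the scoreboard in one shot:
--     # every existing entry gets count*point_weight added, fresh schools are
--     # appended afterwards in first-appearance order. Returns a NEW dict
--     # (A mutates score_dictionary in place; return values are identical).
--     counts = {}
--     for sublist in input_lists:
--         for item in sublist:
--             counts[item] = counts.get(item, 0) + 1
--     result = {school: old + counts.get(school, 0) * point_weight
--               for school, old in score_dictionary.items()}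
--     for school, cnt in counts.items():
--         if school not in score_dictionary:
--             result[school] = cnt * point_weight
--     return result
-- ===== Notes on version B (the rewrite author's own statement) =====
-- stated objective: alternative
-- what changed: B tallies occurrences per school into a count dict first and then builds the scoreboard in one shot - a map over the existing entries adding count*point_weight plus an append of the fresh schools in first-appearance order - instead of A's one dictionary update per occurrence over the flattened list; B returns a new dict (A mutates its argument, return values are identical).
import Mathlib
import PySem

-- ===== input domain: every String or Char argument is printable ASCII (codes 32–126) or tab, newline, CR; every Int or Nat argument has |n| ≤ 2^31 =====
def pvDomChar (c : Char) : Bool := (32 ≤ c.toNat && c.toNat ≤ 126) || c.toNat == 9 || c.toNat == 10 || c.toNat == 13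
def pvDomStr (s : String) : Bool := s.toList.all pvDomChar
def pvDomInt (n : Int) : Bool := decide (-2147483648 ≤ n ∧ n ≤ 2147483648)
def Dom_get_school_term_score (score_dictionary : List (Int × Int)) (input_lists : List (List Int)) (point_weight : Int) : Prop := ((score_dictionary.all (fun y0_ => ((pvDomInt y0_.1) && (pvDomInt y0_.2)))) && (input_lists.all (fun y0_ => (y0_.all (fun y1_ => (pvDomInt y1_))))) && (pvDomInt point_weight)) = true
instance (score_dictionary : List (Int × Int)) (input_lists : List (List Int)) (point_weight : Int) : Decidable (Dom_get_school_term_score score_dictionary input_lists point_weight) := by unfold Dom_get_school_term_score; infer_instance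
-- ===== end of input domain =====

-- B tallies occurrences per school first and then builds the scoreboard in one shot (update the
-- existing entries, append the fresh schools in first-appearance order) instead of A's one dict
-- update per occurrence; equivalence is about the RETURN value (A mutates score_dictionary in
-- place, B returns a new dict with the identical contents and order).

-- ===== PORT A =====
-- A flattens the nested lists, then for each occurrence adds point_weight (or starts at point_weight).
def get_school_term_score (score_dictionary : List (Int × Int)) (input_lists : List (List Int)) (point_weight : Int) : List (Int × Int) :=
  let input_list : List Int := input_lists.flatMap (fun sublist => sublist)
  let d : PySem.Dict Int Int :=
    input_list.foldl (fun d item =>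
      if d.contains item then d.insert item (d.getD item 0 + point_weight)
      else d.insert item point_weight) (PySem.Dict.mk score_dictionary)
  d.items

-- ===== PORT B =====
-- Source B: tally loop; dict comprehension over score_dictionary.items(); then 'result[school] = cnt*w'
-- for the schools not in score_dictionary — that assignment always APPENDS a fresh key (school is
-- outside result's keys so far and the tally's keys are distinct), so it is ported as list append;
-- exact under Pre_ (score_dictionary is a dict, its keys are distinct).
def get_school_term_score_alt (score_dictionary : List (Int × Int)) (input_lists : List (List Int)) (point_weight : Int) : List (Int × Int) :=
  let counts : PySem.Dict Int Int :=
    input_lists.foldl (fun c sublist =>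
      sublist.foldl (fun c item => c.insert item (c.getD item 0 + 1)) c) PySem.Dict.empty
  let result : List (Int × Int) :=
    score_dictionary.map (fun p => (p.1, p.2 + counts.getD p.1 0 * point_weight))
  counts.items.foldl (fun r p =>
    if !(score_dictionary.any (fun q => q.1 == p.1)) then r ++ [(p.1, p.2 * point_weight)] else r)
    result

-- ===== PRECONDITION & SPEC =====
-- Pre_ excludes association lists with a duplicate key: those do not encode a Python dict
-- (A's score_dictionary argument is a dict, so its keys are always distinct).
def Pre_get_school_term_score (score_dictionary : List (Int × Int)) (_input_lists : List (List Int)) (_point_weight : Int) : Prop :=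
  (score_dictionary.map Prod.fst).Nodup
instance (score_dictionary : List (Int × Int)) (input_lists : List (List Int)) (point_weight : Int) : Decidable (Pre_get_school_term_score score_dictionary input_lists point_weight) := by unfold Pre_get_school_term_score; infer_instance
def pvWitness_get_school_term_score : (List (Int × Int)) × List (List Int) × Int := ([(1, 2), (4, 0)], [[1], [3, 1]], 5)

def Spec_get_school_term_score (score_dictionary : List (Int × Int)) (input_lists : List (List Int)) (point_weight : Int) (out : List (Int × Int)) : Prop := out = get_school_term_score_alt score_dictionary input_lists point_weight
instance (score_dictionary : List (Int × Int)) (input_lists : List (List Int)) (point_weight : Int) (out : List (Int × Int)) : Decidable (Spec_get_school_term_score score_dictionary input_lists point_weight out) := by unfold Spec_get_school_term_score; infer_instance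

-- ===== CLAIM (what is proved, stated in full; the proofs are below) =====
def Claim_equal_get_school_term_score : Prop := ∀ (score_dictionary : List (Int × Int)) (input_lists : List (List Int)) (point_weight : Int), Dom_get_school_term_score score_dictionary input_lists point_weight → Pre_get_school_term_score score_dictionary input_lists point_weight → Spec_get_school_term_score score_dictionary input_lists point_weight (get_school_term_score score_dictionary input_lists point_weight)

-- ===== LEMMAS AND PROOFS =====

-- A's occurrence pass, with the membership branch folded into one uniform insert.
def fFold (w : Int) (d : PySem.Dict Int Int) (xs : List Int) : PySem.Dict Int Int :=
  xs.foldl (fun d x => d.insert x (d.getD x 0 + w)) d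

lemma fFold_eq_portA_fold (w : Int) (d : PySem.Dict Int Int) (xs : List Int) :
    xs.foldl (fun d item =>
      if d.contains item then d.insert item (d.getD item 0 + w)
      else d.insert item w) d = fFold w d xs := by
  unfold fFold
  apply PySem.List.foldl_congr_mem
  intro d x _
  by_cases h : d.contains x
  · simp [h]
  · simp [h, PySem.Dict.getD_of_not_contains _ _ (by simpa using h)]

lemma fFold_items (w : Int) (xs : List Int) : ∀ (d : PySem.Dict Int Int), d.keys.Nodup →
    (fFold w d xs).items
      = d.items.map (fun p => (p.1, p.2 + (xs.count p.1 : Int) * w))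
        ++ ((PySem.Set.ofList xs).filter (fun x => !d.contains x)).map
             (fun x => (x, (xs.count x : Int) * w)) := by
  induction xs with
  | nil =>
    intro d _
    simp [fFold, PySem.Set.ofList, PySem.Set.empty]
  | cons x xs ih =>
    intro d hnd
    rw [show fFold w d (x :: xs) = fFold w (d.insert x (d.getD x 0 + w)) xs from rfl,
        ih _ (PySem.Dict.nodup_keys_insert d x _ hnd), PySem.Set.ofList_cons]
    have hfilter2 : ∀ v : Int,
        ((PySem.Set.ofList xs).filter (fun y => !(d.insert x v).contains y))
          = (PySem.Set.ofList xs).filter (fun y => !(y == x) && !d.contains y) := by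
      intro v
      apply List.filter_congr
      intro y _
      simp [PySem.Dict.contains_insert]
    by_cases hc : d.contains x = true
    · -- x already a key of d: the head of ofList (x::xs) is filtered out on both sides
      rw [PySem.Dict.items_insert_of_contains d _ hc, hfilter2, List.map_map]
      have hfilter :
          ((x :: (PySem.Set.ofList xs).discard x).filter (fun y => !d.contains y))
            = (PySem.Set.ofList xs).filter (fun y => !(y == x) && !d.contains y) := by
        simp [hc, PySem.Set.discard, List.filter_filter, Bool.and_comm]
      rw [hfilter]
      congr 1
      · -- updated-entries chunk
        apply List.map_congr_left
        intro p hp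
        by_cases hpx : p.1 = x
        · have hval : d.getD x 0 = p.2 :=
            PySem.Dict.getD_of_mem_items d (by rw [← hpx]; exact hp) hnd 0
          simp [Function.comp, hpx, hval]
          ring
        · have : ¬(x = p.1) := fun h => hpx h.symm
          simp [Function.comp, hpx, this]
      · -- fresh chunk: counts agree for y ≠ x
        apply List.map_congr_left
        intro y hy
        have hyx : ¬(x = y) := by
          have := List.of_mem_filter hy
          simp at this
          exact fun h => this.1 h.symm
        simp [hyx]
    · -- x fresh for d
      have hc' : d.contains x = false := by simpa using hc
      rw [PySem.Dict.items_insert_of_not_contains d _ hc',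
          PySem.Dict.getD_of_not_contains d _ hc', hfilter2]
      have hxk : ∀ p ∈ d.items, p.1 ≠ x := by
        intro p hp h
        exact absurd ((PySem.Dict.contains_iff_mem_keys d x).mpr
          (h ▸ List.mem_map.mpr ⟨p, hp, rfl⟩)) (by simp [hc'])
      have hfilter :
          ((x :: (PySem.Set.ofList xs).discard x).filter (fun y => !d.contains y))
            = x :: (PySem.Set.ofList xs).filter (fun y => !(y == x) && !d.contains y) := by
        simp [hc', PySem.Set.discard, List.filter_filter, Bool.and_comm]
      rw [hfilter, List.map_append, List.append_assoc, List.map_cons]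
      congr 1
      · apply List.map_congr_left
        intro p hp
        have hne : ¬(x = p.1) := fun h => hxk p hp h.symm
        simp [hne]
      · simp only [List.map_cons, List.map_nil, List.singleton_append]
        congr 1
        · simp
          ring
        · apply List.map_congr_left
          intro y hy
          have hyx : ¬(x = y) := by
            have := List.of_mem_filter hy
            simp at this
            exact fun h => this.1 h.symm
          simp [hyx]

-- ===== VERDICT (by name: the statement is the Claim_ definition above) =====
theorem get_school_term_score_spec : Claim_equal_get_school_term_score := by
  intro sd lists w _ hnd
  unfold Spec_get_school_term_score get_school_term_score get_school_term_score_alt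
  simp only []
  rw [List.flatMap_id', fFold_eq_portA_fold,
      fFold_items w lists.flatten (PySem.Dict.mk sd) (by rw [PySem.Dict.keys_mk]; exact hnd),
      ← List.foldl_flatten, PySem.Dict.foldl_insert_getD_add_one_eq_counter,
      PySem.List.foldl_append_if (p := fun p => !sd.any fun q => q.1 == p.1)
        (f := fun p : Int × Int => (p.1, p.2 * w)),
      PySem.Dict.items_counter, List.filter_map, List.map_map]
  congr 1
  exact List.map_congr_left fun p _ => by rw [PySem.Dict.getD_counter]
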